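-- pv_equiv track=rewrite | github.com/niharkhetan/Othello | Othello/NiharKhetanAgent.py | numberOfCurrentColorCoinsVSOpposite
-- ===== SOURCE A (Python) =====
-- def invertColor(color):
--     '''
--     @param color: current color passes -> 'B' or 'W'
--     @return: color if B then W --> else B
--     '''
--     if color == 'B':
--         return 'W'
--     else:
--         return 'B'
--
-- def numberOfCurrentColorCoinsVSOpposite(board, color):
--     '''
--     This function calculates the effective coins on board that is : Max's coins - Min's coins
--     @param board: current state of the game
--             color: color of current move
--     @return: value which is the net value of Max's coins minus Min's coins
--     '''
--     value = 0
--     for eachRow in board: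
--         for eachElement in eachRow:
--             if eachElement == color:
--                 value = value + 1
--             elif eachElement == invertColor(color):
--                 value = value - 1
--     return value
-- ===== SOURCE B (Python) =====
-- def invertColor(color):
--     if color == 'B':
--         return 'W'
--     else:
--         return 'B'
--
-- def numberOfCurrentColorCoinsVSOpposite(board, color):
--     # tally-then-score: flatten once, then two count lookups
--     flat = [cell for row in board for cell in row]
--     return flat.count(color) - flat.count(invertColor(color))
-- ===== Notes on version B (the rewrite author's own statement) =====
-- stated objective: simpler
-- what changed: Replaces per-cell +1/-1 branching inside nested loops by flatten-then-tally: flatten the board once and return count(color) - count(invertColor(color)) via two list.count lookups.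
import Mathlib
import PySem

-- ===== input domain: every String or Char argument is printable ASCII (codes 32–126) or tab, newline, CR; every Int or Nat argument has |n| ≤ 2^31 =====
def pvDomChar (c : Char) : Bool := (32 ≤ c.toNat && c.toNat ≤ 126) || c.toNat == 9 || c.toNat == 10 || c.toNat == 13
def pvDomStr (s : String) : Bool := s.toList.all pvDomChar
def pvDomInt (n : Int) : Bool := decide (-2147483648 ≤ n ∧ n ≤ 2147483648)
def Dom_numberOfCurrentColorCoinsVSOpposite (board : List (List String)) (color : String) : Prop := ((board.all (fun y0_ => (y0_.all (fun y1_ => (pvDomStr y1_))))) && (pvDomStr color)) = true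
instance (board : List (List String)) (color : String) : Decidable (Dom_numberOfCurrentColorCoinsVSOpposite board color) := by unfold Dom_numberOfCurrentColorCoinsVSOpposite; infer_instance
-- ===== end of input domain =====

-- B replaces A's per-cell +1/-1 branching inside nested loops by flatten-then-tally (count(color) - count(invertColor color)); objective: simpler.


-- ===== PORT A =====
def invertColor (color : String) : String :=
  if color == "B" then "W" else "B"

-- A: nested loops, per-cell branch updating an accumulator
def numberOfCurrentColorCoinsVSOpposite (board : List (List String)) (color : String) : Int :=
  board.foldl (fun value eachRow =>
    eachRow.foldl (fun value eachElement =>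
      if eachElement == color then value + 1
      else if eachElement == invertColor color then value - 1
      else value) value) 0

-- ===== PORT B =====
-- B: flatten once, then two count lookups (tally-then-score)
def numberOfCurrentColorCoinsVSOpposite_alt (board : List (List String)) (color : String) : Int :=
  let flat := board.flatMap (fun row => row)
  (PySem.List.count flat color : Int) - (PySem.List.count flat (invertColor color) : Int)

-- ===== PRECONDITION & SPEC =====
def Spec_numberOfCurrentColorCoinsVSOpposite (board : List (List String)) (color : String) (out : Int) : Prop := out = numberOfCurrentColorCoinsVSOpposite_alt board color
instance (board : List (List String)) (color : String) (out : Int) : Decidable (Spec_numberOfCurrentColorCoinsVSOpposite board color out) := by unfold Spec_numberOfCurrentColorCoinsVSOpposite; infer_instance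

-- ===== CLAIM (what is proved, stated in full; the proofs are below) =====
def Claim_equal_numberOfCurrentColorCoinsVSOpposite : Prop := ∀ (board : List (List String)) (color : String), Dom_numberOfCurrentColorCoinsVSOpposite board color → Spec_numberOfCurrentColorCoinsVSOpposite board color (numberOfCurrentColorCoinsVSOpposite board color)

-- ===== LEMMAS AND PROOFS =====

-- ===== VERDICT (by name: the statement is the Claim_ definition above) =====
lemma invert_ne (color : String) : invertColor color ≠ color := by
  unfold invertColor
  by_cases h : color = "B"
  · subst h; decide
  · simp [h]; exact fun he => h he.symm

lemma row_foldl (color : String) (l : List String) (v : Int) :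
    l.foldl (fun value e =>
      if e == color then value + 1
      else if e == invertColor color then value - 1
      else value) v
    = v + (l.count color : Int) - (l.count (invertColor color) : Int) := by
  induction l generalizing v with
  | nil => simp
  | cons x xs ih =>
    simp only [List.foldl_cons, List.count_cons, ih]
    by_cases hx : x = color
    · subst hx
      have : (x == invertColor x) = false := by
        simp [beq_iff_eq]; exact fun h => invert_ne x h.symm
      simp [this]
      push_cast; ring
    · by_cases hi : x = invertColor color
      · simp [hx, hi, beq_iff_eq, invert_ne]
        push_cast; ring
      · simp [hx, hi, beq_iff_eq]

lemma board_foldl (color : String) (board : List (List String)) (v : Int) :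
    board.foldl (fun value eachRow =>
      eachRow.foldl (fun value e =>
        if e == color then value + 1
        else if e == invertColor color then value - 1
        else value) value) v
    = v + ((board.flatMap (fun row => row)).count color : Int)
        - ((board.flatMap (fun row => row)).count (invertColor color) : Int) := by
  induction board generalizing v with
  | nil => simp
  | cons r rs ih =>
    simp only [List.foldl_cons, List.flatMap_cons, List.count_append]
    rw [row_foldl, ih]
    push_cast; ring

theorem numberOfCurrentColorCoinsVSOpposite_spec : Claim_equal_numberOfCurrentColorCoinsVSOpposite := by
  intro board color _
  unfold Spec_numberOfCurrentColorCoinsVSOpposite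
  unfold numberOfCurrentColorCoinsVSOpposite numberOfCurrentColorCoinsVSOpposite_alt
  simp only [PySem.List.count_eq]
  rw [board_foldl]
  ring
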